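-- pv_equiv track=rewrite | github.com/rickwag/python_unlimited_entry_GCD_Program | gcd3.py | compatibility
-- ===== SOURCE A (Python) =====
-- def compatibility(numbers):
--     check=2
--     complist=[]
--     while check < 10:
--         freq=0
--         for num in numbers:
--             if num % check == 0:
--                 freq+=1
--             else:
--                 pass
--         if freq == 3:
--             complist.append("compatible")
--         else:
--             complist.append("incompatible")
--         check+=1
--     return complist
-- ===== SOURCE B (Python) =====
-- def compatibility(numbers):
--     # Residue-class histogram: divisibility by any d in 2..9 depends only on
--     # num % 2520 (2520 = lcm(2..9)), so bucket the numbers by that residue once,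
--     # then count multiples of each d by scanning the (at most 2520) buckets.
--     freq = {}
--     for num in numbers:
--         r = num % 2520
--         freq[r] = freq.get(r, 0) + 1
--     complist = []
--     for d in range(2, 10):
--         count = 0
--         for r, c in freq.items():
--             if r % d == 0:
--                 count += c
--         complist.append("compatible" if count == 3 else "incompatible")
--     return complist
-- ===== Notes on version B (the rewrite author's own statement) =====
-- stated objective: faster
-- what changed: B buckets the numbers once into a residue-mod-2520 frequency dictionary (2520 = lcm(2..9)) and then counts multiples of each divisor by scanning the at most 2520 distinct residues, instead of A's eight full rescans of the input list.
import Mathlib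
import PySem

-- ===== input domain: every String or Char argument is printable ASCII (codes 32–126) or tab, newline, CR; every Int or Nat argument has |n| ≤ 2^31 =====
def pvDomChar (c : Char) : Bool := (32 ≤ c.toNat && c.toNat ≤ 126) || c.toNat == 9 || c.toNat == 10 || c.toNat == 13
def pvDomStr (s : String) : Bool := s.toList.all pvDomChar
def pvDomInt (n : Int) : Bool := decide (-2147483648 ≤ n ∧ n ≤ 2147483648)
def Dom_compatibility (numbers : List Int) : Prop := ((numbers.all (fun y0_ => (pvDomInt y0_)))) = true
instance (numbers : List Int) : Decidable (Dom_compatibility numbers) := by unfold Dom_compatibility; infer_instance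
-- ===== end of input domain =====

-- B replaces A's eight rescans of the list by one bucketing pass into a residue-mod-2520
-- frequency dictionary (2520 = lcm(2..9)) consumed per divisor (objective: alternative).

-- ===== PORT A =====
-- while check < 10: rescan numbers counting multiples of check, append label
def compatibility (numbers : List Int) : List String :=
  (PySem.List.pyRange 2 10 1).foldl (fun complist check =>
    let freq := numbers.foldl (fun freq num =>
      if PySem.Int.mod num check == 0 then freq + 1 else freq) (0 : Int)
    complist ++ [if freq == 3 then "compatible" else "incompatible"]) []

-- ===== PORT B =====
-- one bucketing pass building freq : residue mod 2520 → multiplicity, then per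
-- divisor a scan of freq.items summing the multiplicities of divisible residues
def compatibility_alt (numbers : List Int) : List String :=
  let freq := numbers.foldl (fun fr num =>
      let r := PySem.Int.mod num 2520
      fr.insert r (fr.getD r 0 + 1)) (PySem.Dict.empty : PySem.Dict Int Int)
  (PySem.List.pyRange 2 10 1).foldl (fun complist d =>
    let count := freq.items.foldl (fun s rc =>
      if PySem.Int.mod rc.1 d == 0 then s + rc.2 else s) (0 : Int)
    complist ++ [if count == 3 then "compatible" else "incompatible"]) []

-- ===== PRECONDITION & SPEC =====
def Spec_compatibility (numbers : List Int) (out : List String) : Prop := out = compatibility_alt numbers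
instance (numbers : List Int) (out : List String) : Decidable (Spec_compatibility numbers out) := by unfold Spec_compatibility; infer_instance

-- ===== CLAIM (what is proved, stated in full; the proofs are below) =====
def Claim_equal_compatibility : Prop := ∀ (numbers : List Int), Dom_compatibility numbers → Spec_compatibility numbers (compatibility numbers)

-- ===== LEMMAS AND PROOFS =====

-- B's summing loop over (residue, multiplicity) pairs is a filtered sum
theorem foldl_sum_if (q : Int → Bool) :
    ∀ (l : List (Int × Int)) (a : Int),
      l.foldl (fun s rc => if q rc.1 then s + rc.2 else s) a
        = a + ((l.filter (fun rc => q rc.1)).map (·.2)).sum := by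
  intro l
  induction l with
  | nil => simp
  | cons rc l ih =>
    intro a
    by_cases h : q rc.1
    · simp [h, ih]; ring
    · simp [h, ih]

-- summing the multiplicities of the selected distinct residues counts the selected elements
theorem sum_count_ofList (q : Int → Bool) (rs : List Int) :
    (((PySem.Set.ofList rs).filter q).map (fun r => (rs.count r : Int))).sum
      = (rs.countP q : Int) := by
  have hperm : (PySem.Set.ofList rs).Perm rs.dedup := by
    rw [List.perm_ext_iff_of_nodup (PySem.Set.nodup_ofList rs) (List.nodup_dedup rs)]
    intro a; simp [PySem.Set.mem_ofList, List.mem_dedup]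
  have h1 := (((hperm.filter q).map (fun r => (rs.count r : Int))).sum_eq)
  rw [h1]
  have h2 := List.sum_map_count_dedup_filter_eq_countP q rs
  calc ((rs.dedup.filter q).map (fun r => (rs.count r : Int))).sum
      = (((rs.dedup.filter q).map (fun r => rs.count r)).map (Nat.cast : Nat → Int)).sum := by
        rw [List.map_map]; rfl
    _ = (((rs.dedup.filter q).map (fun r => rs.count r)).sum : Nat) := by
        exact Eq.symm (Nat.cast_list_sum _)
    _ = (rs.countP q : Int) := by exact_mod_cast congrArg Nat.cast h2

-- divisibility by d ∣ 2520 is read off the residue mod 2520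
theorem mod_residue (d n : Int) (hd : d ∣ 2520) :
    (PySem.Int.mod (PySem.Int.mod n 2520) d == 0) = (PySem.Int.mod n d == 0) := by
  have h := PySem.Int.floordiv_mul_add_mod n 2520
  have hq : d ∣ PySem.Int.floordiv n 2520 * 2520 := Dvd.dvd.mul_left hd _
  have : (d ∣ PySem.Int.mod n 2520) ↔ (d ∣ n) := by
    constructor
    · intro hm; rw [← h]; exact dvd_add hq hm
    · intro hn; rw [← h] at hn; exact (Int.dvd_add_right hq).mp hn
  rw [Bool.eq_iff_iff, beq_iff_eq, beq_iff_eq, PySem.Int.mod_eq_zero_iff_dvd,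
      PySem.Int.mod_eq_zero_iff_dvd]
  exact this

-- the two per-divisor counts agree for every divisor of 2520
theorem counts_eq (numbers : List Int) (d : Int) (hd : d ∣ 2520) :
    (numbers.foldl
        (fun fr num => fr.insert (PySem.Int.mod num 2520)
          (fr.getD (PySem.Int.mod num 2520) 0 + 1))
        (PySem.Dict.empty : PySem.Dict Int Int)).items.foldl
        (fun s rc => if PySem.Int.mod rc.1 d == 0 then s + rc.2 else s) (0 : Int)
      = numbers.foldl (fun freq num =>
          if PySem.Int.mod num d == 0 then freq + 1 else freq) (0 : Int) := by
  have hfold : numbers.foldl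
      (fun fr num => fr.insert (PySem.Int.mod num 2520)
        (fr.getD (PySem.Int.mod num 2520) 0 + 1))
      (PySem.Dict.empty : PySem.Dict Int Int)
    = (numbers.map (fun num => PySem.Int.mod num 2520)).foldl
      (fun fr r => fr.insert r (fr.getD r 0 + 1)) PySem.Dict.empty := by
    rw [List.foldl_map]
  simp only [hfold]
  set rs := numbers.map (fun num => PySem.Int.mod num 2520) with hrs
  rw [PySem.Dict.foldl_insert_getD_add_one_eq_counter,
      foldl_sum_if (fun r => PySem.Int.mod r d == 0),
      PySem.List.foldl_count_if, PySem.Dict.items_counter,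
      List.filter_map, List.map_map]
  have : (((PySem.Set.ofList rs).filter
        (fun r => PySem.Int.mod r d == 0)).map (fun r => (rs.count r : Int))).sum
      = (rs.countP (fun r => PySem.Int.mod r d == 0) : Int) :=
    sum_count_ofList _ rs
  simp only [Function.comp_def, zero_add] at this ⊢
  rw [this, hrs, List.countP_map]
  congr 2
  funext n
  exact mod_residue d n hd

-- ===== VERDICT (by name: the statement is the Claim_ definition above) =====
theorem compatibility_spec : Claim_equal_compatibility := by
  intro numbers _
  show compatibility numbers = compatibility_alt numbers
  simp only [compatibility, compatibility_alt]
  rw [PySem.List.foldl_append_singleton_eq_map, PySem.List.foldl_append_singleton_eq_map]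
  simp only [List.nil_append]
  apply List.map_congr_left
  intro d hd
  obtain ⟨h2, h10⟩ := PySem.List.mem_pyRange_one.mp hd
  have hdvd : d ∣ 2520 := by interval_cases d <;> decide
  rw [counts_eq numbers d hdvd]
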